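-- pv_equiv track=rewrite | github.com/ronakrpanchal/sem-5 | IS Lab/Practical-1/revised.py | caesar_with_fibonacci
-- ===== SOURCE A (Python) =====
-- def generate_fibonacci(n):
--     fib_sequence = [0, 1]
--     while len(fib_sequence) < n:
--         fib_sequence.append(fib_sequence[-1] + fib_sequence[-2])
--     return fib_sequence[:n]
--
-- def caesar_with_fibonacci(start_text, cipher_direction):
--     n = len(start_text)
--     fib_sequence = generate_fibonacci(n)
--     end_text = ""
--     for i in range(n):
--         char = start_text[i]
--         shift_amount = fib_sequence[i] % 26
--         if char in alphabet:
--             position = alphabet.index(char)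
--             if cipher_direction == "e":
--                 new_position = (position + shift_amount) % len(alphabet)
--             elif cipher_direction == "d":
--                 new_position = (position - shift_amount) % len(alphabet)
--             end_text += alphabet[new_position]
--         else:
--             end_text += char
--     return end_text
--
-- alphabet = ['a', 'b', 'c', 'd', 'e', 'f', 'g', 'h', 'i', 'j', 'k', 'l', 'm', 'n', 'o', 'p', 'q', 'r', 's', 't', 'u', 'v', 'w', 'x', 'y', 'z']
-- ===== SOURCE B (Python) =====
-- _ALPHA = "abcdefghijklmnopqrstuvwxyz"
-- # the 26 rotated alphabets: _ROT[k][p] is letter p shifted by k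
-- _ROT = ["".join(_ALPHA[(p + k) % 26] for p in range(26)) for k in range(26)]
--
-- def _pisano26():
--     # Fibonacci mod 26 is periodic with period 84 (the Pisano period of 26)
--     cyc = [0, 1]
--     for _ in range(82):
--         cyc.append((cyc[-2] + cyc[-1]) % 26)
--     return cyc
--
-- _CYCLE = _pisano26()
--
-- def caesar_with_fibonacci(start_text, cipher_direction):
--     sign = 1 if cipher_direction == "e" else (-1 if cipher_direction == "d" else None)
--     out = []
--     for i, ch in enumerate(start_text):
--         p = ord(ch) - 97
--         if 0 <= p < 26:
--             out.append(_ROT[(sign * _CYCLE[i % 84]) % 26][p])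
--         else:
--             out.append(ch)
--     return "".join(out)
-- ===== Notes on version B (the rewrite author's own statement) =====
-- stated objective: faster
-- what changed: B replaces A's per-input Fibonacci table and alphabet.index scans by two fixed precomputed tables: the 84-entry Pisano cycle of Fibonacci mod 26 (shift = cycle[i % 84]) and the 26 rotated alphabets, so each character is a pure table lookup and no big integers are ever built.
import Mathlib
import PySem

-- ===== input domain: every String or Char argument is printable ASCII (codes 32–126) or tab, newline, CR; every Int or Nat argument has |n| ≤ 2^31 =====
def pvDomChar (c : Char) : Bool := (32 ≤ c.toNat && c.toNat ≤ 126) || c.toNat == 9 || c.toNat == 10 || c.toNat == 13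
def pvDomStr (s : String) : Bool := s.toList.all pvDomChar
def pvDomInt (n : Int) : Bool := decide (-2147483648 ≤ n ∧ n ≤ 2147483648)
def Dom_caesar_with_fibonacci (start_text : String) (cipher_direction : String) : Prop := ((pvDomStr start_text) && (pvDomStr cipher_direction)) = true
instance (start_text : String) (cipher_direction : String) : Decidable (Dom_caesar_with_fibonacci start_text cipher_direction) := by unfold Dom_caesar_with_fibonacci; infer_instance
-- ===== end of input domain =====

-- B replaces A's per-input Fibonacci table (huge integers) by the fixed 84-entry Pisano cycle of
-- Fibonacci mod 26 and precomputed rotation alphabets, indexed per character (objective: faster).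

-- ===== PORT A =====
def pvAlphabet : List Char :=
  ['a','b','c','d','e','f','g','h','i','j','k','l','m','n','o','p','q','r','s','t','u','v','w','x','y','z']

-- fib_sequence[-1] + fib_sequence[-2]; the list always has ≥ 2 elements here, so getD 0 is exact
def pvLast2 (seq : List Int) : Int :=
  (PySem.List.pyGet? seq (-1)).getD 0 + (PySem.List.pyGet? seq (-2)).getD 0

-- the `while len(fib_sequence) < n` loop; fuel n suffices since the length starts at 2 and grows by 1
def pvGenFibGo : Nat → Nat → List Int → List Int
  | 0, _, seq => seq
  | fuel+1, n, seq => if seq.length < n then pvGenFibGo fuel n (seq ++ [pvLast2 seq]) else seq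

def generate_fibonacci (n : Nat) : List Int := (pvGenFibGo n n [0, 1]).take n

-- loop body: shift_amount is passed in; `alphabet.index(char)` and `alphabet[new_position]`
-- are always in range here, so the defaults are never used.  When cipher_direction is neither
-- "e" nor "d" and char is a letter, Python raises UnboundLocalError: excluded by Pre_ (port returns c).
def pvAStep (cd : String) (shift : Int) (c : Char) : Char :=
  if c ∈ pvAlphabet then
    let pos : Int := ((PySem.List.index? pvAlphabet c).getD 0 : Nat)
    if cd = "e" then (PySem.List.pyGet? pvAlphabet (PySem.Int.mod (pos + shift) 26)).getD c
    else if cd = "d" then (PySem.List.pyGet? pvAlphabet (PySem.Int.mod (pos - shift) 26)).getD c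
    else c
  else c

-- `for i in range(n)`: start_text[i] is always in range, so getD ' ' is exact
def pvALoop (text : List Char) (fib : List Int) (cd : String) (n : Nat) (i : Nat) (acc : List Char) : List Char :=
  if _h : i < n then
    pvALoop text fib cd n (i+1)
      (acc ++ [pvAStep cd (PySem.Int.mod ((PySem.List.pyGet? fib (i : Int)).getD 0) 26) (text.getD i ' ')])
  else acc
termination_by n - i

def caesar_with_fibonacci (start_text : String) (cipher_direction : String) : String :=
  String.mk (pvALoop start_text.toList (generate_fibonacci start_text.toList.length)
    cipher_direction start_text.toList.length 0 [])

-- ===== PORT B =====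
-- _ROT[k][p] = _ALPHA[(p+k) % 26]; string indexing is always in range, so getD is exact
def pvRot : List (List Char) :=
  (List.range 26).map (fun k => (List.range 26).map (fun p => pvAlphabet.getD ((p + k) % 26) ' '))

-- `cyc.append((cyc[-2] + cyc[-1]) % 26)` repeated 82 times
def pvCycleGo : Nat → List Int → List Int
  | 0, cyc => cyc
  | m+1, cyc =>
      pvCycleGo m (cyc ++
        [PySem.Int.mod ((PySem.List.pyGet? cyc (-2)).getD 0 + (PySem.List.pyGet? cyc (-1)).getD 0) 26])

def pvCycle : List Int := pvCycleGo 82 [0, 1]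

-- loop body: _ROT and _CYCLE indices are in range, so the getD defaults are never used.
-- sign is none for an unknown direction; Python then raises TypeError on the first letter:
-- excluded by Pre_ (port returns c there)
def pvBStep (sign : Option Int) (i : Nat) (c : Char) : Char :=
  if 0 ≤ (c.toNat : Int) - 97 ∧ (c.toNat : Int) - 97 < 26 then
    match sign with
    | some sg =>
      ((PySem.List.pyGet? pvRot (PySem.Int.mod (sg * ((PySem.List.pyGet? pvCycle ((i % 84 : Nat) : Int)).getD 0)) 26)).getD []).getD ((c.toNat : Int) - 97).toNat ' '
    | none => c
  else c

-- `for i, ch in enumerate(start_text)` with out.append(...)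
def pvBGo (sign : Option Int) (i : Nat) : List Char → List Char
  | [] => []
  | c :: rest => pvBStep sign i c :: pvBGo sign (i+1) rest

def caesar_with_fibonacci_alt (start_text : String) (cipher_direction : String) : String :=
  String.mk (pvBGo
    (if cipher_direction = "e" then some 1 else if cipher_direction = "d" then some (-1) else none)
    0 start_text.toList)

-- ===== PRECONDITION & SPEC =====
-- Pre_ excludes exactly the inputs on which A raises UnboundLocalError:
-- a direction other than "e"/"d" together with a lowercase letter in the text.
def Pre_caesar_with_fibonacci (start_text : String) (cipher_direction : String) : Prop :=
  cipher_direction = "e" ∨ cipher_direction = "d" ∨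
    ∀ c ∈ start_text.toList, ¬ (97 ≤ c.toNat ∧ c.toNat ≤ 122)
instance (start_text : String) (cipher_direction : String) : Decidable (Pre_caesar_with_fibonacci start_text cipher_direction) := by
  unfold Pre_caesar_with_fibonacci; infer_instance

def pvWitness_caesar_with_fibonacci : String × String := ("hello world!", "e")

def Spec_caesar_with_fibonacci (start_text : String) (cipher_direction : String) (out : String) : Prop := out = caesar_with_fibonacci_alt start_text cipher_direction
instance (start_text : String) (cipher_direction : String) (out : String) : Decidable (Spec_caesar_with_fibonacci start_text cipher_direction out) := by unfold Spec_caesar_with_fibonacci; infer_instance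

-- ===== CLAIM (what is proved, stated in full; the proofs are below) =====
def Claim_equal_caesar_with_fibonacci : Prop := ∀ (start_text : String) (cipher_direction : String), Dom_caesar_with_fibonacci start_text cipher_direction → Pre_caesar_with_fibonacci start_text cipher_direction → Spec_caesar_with_fibonacci start_text cipher_direction (caesar_with_fibonacci start_text cipher_direction)

-- ===== LEMMAS AND PROOFS =====

def fibStd : Nat → Int
  | 0 => 0
  | 1 => 1
  | n+2 => fibStd n + fibStd (n+1)

def fibPrefix (m : Nat) : List Int := (List.range m).map fibStd

theorem fibPrefix_succ (k : Nat) : fibPrefix (k+1) = fibPrefix k ++ [fibStd k] := by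
  simp [fibPrefix, List.range_succ]

theorem pvLast2_fibPrefix (k : Nat) (hk : 2 ≤ k) : pvLast2 (fibPrefix k) = fibStd k := by
  obtain ⟨j, rfl⟩ : ∃ j, k = j + 2 := ⟨k - 2, by omega⟩
  have hlen : (fibPrefix (j+2)).length = j + 2 := by simp [fibPrefix]
  unfold pvLast2
  rw [PySem.List.pyGet?_neg_one, PySem.List.pyGet?_neg_ofNat _ 2 (by omega) (by rw [hlen]; omega),
    hlen]
  have hl : (fibPrefix (j+2)).getLast? = some (fibStd (j+1)) := by
    simp [fibPrefix, List.range_succ]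
  rw [hl]
  have hg : (fibPrefix (j+2))[j+2-2]? = some (fibStd j) := by simp [fibPrefix]
  rw [hg]
  show fibStd (j+1) + fibStd j = fibStd (j+2)
  rw [show fibStd (j+2) = fibStd j + fibStd (j+1) from rfl]
  ring

theorem pvGenFibGo_fib (fuel n k : Nat) (hk : 2 ≤ k) (hn : n ≤ k + fuel) :
    pvGenFibGo fuel n (fibPrefix k) = fibPrefix (max k n) := by
  induction fuel generalizing k with
  | zero =>
    simp only [pvGenFibGo]
    have : max k n = k := by omega
    rw [this]
  | succ fuel ih =>
    simp only [pvGenFibGo]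
    by_cases h : (fibPrefix k).length < n
    · have hlen : (fibPrefix k).length = k := by simp [fibPrefix]
      rw [if_pos h, pvLast2_fibPrefix k hk, ← fibPrefix_succ, ih (k+1) (by omega) (by omega)]
      have : max (k+1) n = max k n := by rw [hlen] at h; omega
      rw [this]
    · have hlen : (fibPrefix k).length = k := by simp [fibPrefix]
      rw [if_neg h]
      have : max k n = k := by rw [hlen] at h; omega
      rw [this]

theorem generate_fibonacci_eq (n : Nat) : generate_fibonacci n = fibPrefix n := by
  have h2 : ([0, 1] : List Int) = fibPrefix 2 := by decide
  unfold generate_fibonacci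
  rw [h2, pvGenFibGo_fib n n 2 (by omega) (by omega)]
  simp [fibPrefix, ← List.map_take, List.take_range]

theorem fib_table (n i : Nat) (hi : i < n) :
    (PySem.List.pyGet? (generate_fibonacci n) (i : Int)).getD 0 = fibStd i := by
  rw [generate_fibonacci_eq, PySem.List.pyGet?_natCast]
  simp [fibPrefix, hi]

theorem mem_alpha (c : Char) : c ∈ pvAlphabet ↔ (97 ≤ c.toNat ∧ c.toNat ≤ 122) := by
  constructor
  · intro h
    have hall : pvAlphabet.all (fun x => decide (97 ≤ x.toNat) && decide (x.toNat ≤ 122)) = true := by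
      decide
    have := List.all_eq_true.1 hall c h
    simp at this
    exact this
  · rintro ⟨h1, h2⟩
    rw [← Char.ofNat_toNat c]
    generalize c.toNat = n at h1 h2 ⊢
    interval_cases n <;> decide

theorem alpha_get (t : Int) (h0 : 0 ≤ t) (h1 : t < 26) (d : Char) :
    (PySem.List.pyGet? pvAlphabet t).getD d = Char.ofNat (97 + t.toNat) := by
  obtain ⟨m, rfl⟩ := Int.eq_ofNat_of_zero_le h0
  rw [PySem.List.pyGet?_natCast]
  have h : m < 26 := by omega
  simp only [Int.toNat_natCast]
  interval_cases m <;> rfl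

theorem alpha_index (c : Char) (hc : c ∈ pvAlphabet) :
    ((PySem.List.index? pvAlphabet c).getD 0 : Int) = (c.toNat : Int) - 97 := by
  have hall : pvAlphabet.all
      (fun x => decide (((PySem.List.index? pvAlphabet x).getD 0 : Int) = (x.toNat : Int) - 97)) = true := by
    decide
  have := List.all_eq_true.1 hall c hc
  simpa using this

-- the Pisano cycle: bounds, seeds and the wrapped Fibonacci recurrence (84 concrete checks)
set_option maxRecDepth 20000 in
theorem cyc_bound : ∀ j, j < 84 → 0 ≤ pvCycle.getD j 0 ∧ pvCycle.getD j 0 < 26 := by decide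

set_option maxRecDepth 20000 in
theorem cyc_step : ∀ j, j < 84 →
    (pvCycle.getD j 0 + pvCycle.getD ((j+1) % 84) 0) % 26 = pvCycle.getD ((j+2) % 84) 0 := by decide

theorem cyc_get (i : Nat) :
    (PySem.List.pyGet? pvCycle ((i % 84 : Nat) : Int)).getD 0 = pvCycle.getD (i % 84) 0 := by
  rw [PySem.List.pyGet?_natCast]
  simp [List.getD_eq_getElem?_getD]

-- Fibonacci mod 26 is periodic with period 84
theorem fib_mod_cycle (i : Nat) :
    fibStd i % 26 = pvCycle.getD (i % 84) 0 ∧ fibStd (i+1) % 26 = pvCycle.getD ((i+1) % 84) 0 := by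
  induction i with
  | zero => exact ⟨by decide, by decide⟩
  | succ i ih =>
    refine ⟨ih.2, ?_⟩
    have hrec : fibStd (i+2) = fibStd i + fibStd (i+1) := rfl
    have hj : (i+1) % 84 = (i % 84 + 1) % 84 := by omega
    have hj2 : (i+2) % 84 = (i % 84 + 2) % 84 := by omega
    have hstep := cyc_step (i % 84) (Nat.mod_lt _ (by omega))
    have h1 := ih.1
    have h2 : fibStd (i+1) % 26 = pvCycle.getD ((i % 84 + 1) % 84) 0 := by rw [ih.2, hj]
    rw [hrec, hj2, ← hstep, ← h1, ← h2]
    omega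

theorem pmod26 (a : Int) : PySem.Int.mod a 26 = a % 26 :=
  PySem.Int.mod_eq_emod_of_pos (by norm_num)

theorem fib_shift (i : Nat) : PySem.Int.mod (fibStd i) 26 = pvCycle.getD (i % 84) 0 := by
  rw [pmod26]
  exact (fib_mod_cycle i).1

-- the rotation table: _ROT[k][p] = chr(97 + (p+k) % 26)  (676 concrete checks)
set_option maxRecDepth 20000 in
theorem rot_get : ∀ (k : Nat), k < 26 → ∀ (p : Nat), p < 26 →
    ((PySem.List.pyGet? pvRot (k : Int)).getD []).getD p ' ' = Char.ofNat ((97 + (p + k) % 26 : Nat)) := by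
  decide

theorem step_eq (cd : String) (sign : Int)
    (hsg : (cd = "e" ∧ sign = 1) ∨ (cd = "d" ∧ sign = -1)) (i : Nat) (c : Char) :
    pvAStep cd (PySem.Int.mod (fibStd i) 26) c = pvBStep (some sign) i c := by
  have hs := fib_shift i
  obtain ⟨hs0, hs1⟩ := cyc_bound (i % 84) (Nat.mod_lt _ (by omega))
  set s : Int := pvCycle.getD (i % 84) 0 with hsdef
  by_cases hc : c ∈ pvAlphabet
  · have hb := (mem_alpha c).1 hc
    have hpos := alpha_index c hc
    have hbp : (0 : Int) ≤ (c.toNat : Int) - 97 ∧ (c.toNat : Int) - 97 < 26 := by omega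
    have hk0 : (0 : Int) ≤ (sign * s) % 26 := Int.emod_nonneg _ (by norm_num)
    have hk1 : (sign * s) % 26 < 26 := Int.emod_lt_of_pos _ (by norm_num)
    have hidx : PySem.Int.mod (sign * s) 26 = (((sign * s) % 26).toNat : Int) := by
      rw [pmod26]; omega
    have hB : pvBStep (some sign) i c
        = Char.ofNat (97 + (((c.toNat : Int) - 97 + (sign * s) % 26) % 26).toNat) := by
      simp only [pvBStep, if_pos hbp, cyc_get i, ← hsdef]
      rw [hidx, rot_get _ (by omega) ((c.toNat : Int) - 97).toNat (by omega)]
      congr 1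
      omega
    rw [hB]
    rcases hsg with ⟨rfl, rfl⟩ | ⟨rfl, rfl⟩
    · simp only [pvAStep, if_pos hc, reduceIte]
      rw [hs, hpos, pmod26,
        alpha_get _ (Int.emod_nonneg _ (by norm_num)) (Int.emod_lt_of_pos _ (by norm_num))]
      congr 1
      omega
    · simp only [pvAStep, if_pos hc, reduceIte]
      rw [if_neg (by decide : ¬ ("d" : String) = "e"), hs, hpos, pmod26,
        alpha_get _ (Int.emod_nonneg _ (by norm_num)) (Int.emod_lt_of_pos _ (by norm_num))]
      congr 1
      omega
  · have hb : ¬ (97 ≤ c.toNat ∧ c.toNat ≤ 122) := fun h => hc ((mem_alpha c).2 h)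
    have hbp : ¬ ((0 : Int) ≤ (c.toNat : Int) - 97 ∧ (c.toNat : Int) - 97 < 26) := by omega
    simp only [pvAStep, pvBStep, if_neg hc, if_neg hbp]

theorem loop_eq (cd : String) (sign : Int)
    (hsg : (cd = "e" ∧ sign = 1) ∨ (cd = "d" ∧ sign = -1)) (text : List Char) :
    ∀ (rest : List Char) (i : Nat) (acc : List Char),
      rest = text.drop i → i ≤ text.length →
      pvALoop text (generate_fibonacci text.length) cd text.length i acc
        = acc ++ pvBGo (some sign) i rest := by
  intro rest
  induction rest with
  | nil =>
    intro i acc hrest _hi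
    have hlen : text.length ≤ i := List.drop_eq_nil_iff.1 hrest.symm
    rw [pvALoop, dif_neg (by omega)]
    simp [pvBGo]
  | cons c rest ih =>
    intro i acc hrest hi
    have hlt : i < text.length := by
      by_contra h
      rw [List.drop_eq_nil_of_le (by omega)] at hrest
      simp at hrest
    have hdrop := List.drop_eq_getElem_cons hlt
    rw [← hrest] at hdrop
    obtain ⟨hc, hrest'⟩ : text[i] = c ∧ rest = text.drop (i+1) := by
      injection hdrop with h1 h2
      exact ⟨h1.symm, h2⟩
    rw [pvALoop, dif_pos hlt, fib_table text.length i hlt,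
      List.getD_eq_getElem _ _ hlt, hc,
      step_eq cd sign hsg i c,
      ih (i+1) _ hrest' (by omega), pvBGo]
    simp

theorem loopA_id (text : List Char) (fib : List Int) (cd : String)
    (hall : ∀ c ∈ text, ¬ (97 ≤ c.toNat ∧ c.toNat ≤ 122)) :
    ∀ (k i : Nat) (acc : List Char), text.length - i ≤ k →
      pvALoop text fib cd text.length i acc = acc ++ text.drop i := by
  intro k
  induction k with
  | zero =>
    intro i acc hk
    rw [pvALoop, dif_neg (by omega), List.drop_eq_nil_of_le (by omega), List.append_nil]
  | succ k ih =>
    intro i acc hk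
    by_cases hlt : i < text.length
    · have hstep : pvAStep cd (PySem.Int.mod ((PySem.List.pyGet? fib (i : Int)).getD 0) 26) (text.getD i ' ') = text[i] := by
        rw [List.getD_eq_getElem _ _ hlt]
        have hm : text[i] ∉ pvAlphabet := fun h =>
          hall text[i] (List.getElem_mem hlt) ((mem_alpha _).1 h)
        simp only [pvAStep, if_neg hm]
      rw [pvALoop, dif_pos hlt, hstep, ih (i+1) _ (by omega),
        List.drop_eq_getElem_cons hlt]
      simp
    · rw [pvALoop, dif_neg hlt, List.drop_eq_nil_of_le (by omega), List.append_nil]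

theorem loopB_id (sign : Option Int) (text : List Char)
    (hall : ∀ c ∈ text, ¬ (97 ≤ c.toNat ∧ c.toNat ≤ 122)) :
    ∀ (rest : List Char) (i : Nat), (∀ c ∈ rest, c ∈ text) →
      pvBGo sign i rest = rest := by
  intro rest
  induction rest with
  | nil => intro i _; rfl
  | cons c rest ih =>
    intro i hsub
    have hc : pvBStep sign i c = c := by
      have h := hall c (hsub c (by simp))
      have hbp : ¬ ((0 : Int) ≤ (c.toNat : Int) - 97 ∧ (c.toNat : Int) - 97 < 26) := by
        simp only [not_and_or, not_le, not_lt] at h ⊢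
        omega
      simp only [pvBStep, if_neg hbp]
    rw [pvBGo, hc, ih (i+1) (fun x hx => hsub x (by simp [hx]))]

-- ===== VERDICT (by name: the statement is the Claim_ definition above) =====
theorem caesar_with_fibonacci_spec : Claim_equal_caesar_with_fibonacci := by
  intro s cd _hdom hpre
  unfold Spec_caesar_with_fibonacci caesar_with_fibonacci caesar_with_fibonacci_alt
  by_cases he : cd = "e"
  · subst he
    rw [loop_eq "e" 1 (Or.inl ⟨rfl, rfl⟩) s.toList s.toList 0 [] List.drop_zero.symm (by omega),
      if_pos rfl]
    rfl
  · by_cases hd : cd = "d"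
    · subst hd
      rw [loop_eq "d" (-1) (Or.inr ⟨rfl, rfl⟩) s.toList s.toList 0 [] List.drop_zero.symm (by omega),
        if_neg (by decide : ¬ ("d" : String) = "e")]
      rfl
    · have hall : ∀ c ∈ s.toList, ¬ (97 ≤ c.toNat ∧ c.toNat ≤ 122) := by
        rcases hpre with h | h | h
        · exact absurd h he
        · exact absurd h hd
        · exact h
      rw [loopA_id s.toList _ cd hall s.toList.length 0 [] (by omega),
        loopB_id _ s.toList hall s.toList 0 (fun x hx => hx)]
      simp
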